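-- pv_equiv track=rewrite | github.com/ceilingFan456/CS6208_AY25-26_project | miniclips_python/overcooked_goal_model.py | recipe_to_goal_name
-- ===== SOURCE A (Python) =====
-- from typing import Dict, List, Tuple
--
-- def recipe_to_goal_name(ingredients: List[str]) -> str:
--     """Convert a recipe ingredient list to a readable goal name.
--
--     E.g. ["onion","onion","onion"] -> "3_onion_soup"
--          ["tomato","cucumber","rice"] -> "cucumber_rice_tomato_soup"
--     """
--     from collections import Counter
--     counts = Counter(ingredients)
--     parts = []
--     for ing in sorted(counts.keys()):
--         c = counts[ing]
--         if c > 1: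
--             parts.append(f"{c}_{ing}")
--         else:
--             parts.append(ing)
--     return "_".join(parts) + "_soup"
-- ===== SOURCE B (Python) =====
-- def _merge(u, v):
--     """Merge two strictly-key-sorted (ingredient, count) lists, adding counts of equal keys."""
--     out = []
--     i = j = 0
--     while i < len(u) and j < len(v):
--         if u[i][0] < v[j][0]:
--             out.append(u[i]); i += 1
--         elif v[j][0] < u[i][0]:
--             out.append(v[j]); j += 1
--         else:
--             out.append((u[i][0], u[i][1] + v[j][1])); i += 1; j += 1
--     out.extend(u[i:])
--     out.extend(v[j:])
--     return out
--
-- def _agg(xs):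
--     """Divide and conquer: aggregate xs into a strictly-sorted (ingredient, count) list."""
--     if len(xs) <= 1:
--         return [(xs[0], 1)] if xs else []
--     mid = len(xs) // 2
--     return _merge(_agg(xs[:mid]), _agg(xs[mid:]))
--
-- def recipe_to_goal_name(ingredients):
--     """Mergesort-style divide and conquer that combines counts while merging:
--     no sort() call, no Counter/dict."""
--     parts = [f"{c}_{ing}" if c > 1 else ing for ing, c in _agg(ingredients)]
--     return "_".join(parts) + "_soup"
-- ===== Notes on version B (the rewrite author's own statement) =====
-- stated objective: alternative
-- what changed: B uses neither sort() nor a Counter/dict: it aggregates by divide and conquer - recursively split the list in half, and merge the two strictly-sorted (ingredient,count) association lists while summing counts of equal keys - then formats the merged runs.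
import Mathlib
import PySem

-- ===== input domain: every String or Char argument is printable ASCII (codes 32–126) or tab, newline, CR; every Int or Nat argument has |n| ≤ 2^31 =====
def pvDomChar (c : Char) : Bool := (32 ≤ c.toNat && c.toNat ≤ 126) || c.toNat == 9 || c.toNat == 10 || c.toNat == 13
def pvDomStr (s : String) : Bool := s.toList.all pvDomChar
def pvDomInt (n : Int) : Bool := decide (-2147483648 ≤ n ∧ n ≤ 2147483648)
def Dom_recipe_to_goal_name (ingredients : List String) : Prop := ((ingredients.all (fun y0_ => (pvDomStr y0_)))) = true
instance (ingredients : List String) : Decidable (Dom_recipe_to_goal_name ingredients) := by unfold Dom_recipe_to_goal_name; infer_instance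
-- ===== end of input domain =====

-- B replaces A's Counter frequency table + sorted(keys) pass by a divide-and-conquer
-- aggregation: split in half, recurse, and merge strictly-sorted (ingredient, count)
-- lists while summing counts of equal keys — no sort call, no dict (objective: alternative).


-- ===== PORT A =====
def recipe_to_goal_name (ingredients : List String) : String :=
  let counts := PySem.Dict.counter ingredients
  let parts : List String :=
    (PySem.List.sorted counts.keys (fun x => x)).foldl
      (fun parts ing =>
        let c := counts.getD ing 0
        if c > 1 then parts ++ [PySem.Int.toStr c ++ "_" ++ ing]
        else parts ++ [ing]) []
  PySem.Str.join "_" parts ++ "_soup"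

-- ===== PORT B =====
-- _merge of Source B: the two-pointer while loop over u[i:], v[j:] is the structural
-- recursion on the two list tails; the trailing out.extend(u[i:])/out.extend(v[j:])
-- are the base cases
def pvMerge (u v : List (String × Int)) : List (String × Int) :=
  match u, v with
  | [], v => v
  | u, [] => u
  | (a, c) :: ut, (b, d) :: vt =>
    if a < b then (a, c) :: pvMerge ut ((b, d) :: vt)
    else if b < a then (b, d) :: pvMerge ((a, c) :: ut) vt
    else (a, c + d) :: pvMerge ut vt

-- _agg of Source B: xs[:mid] / xs[mid:] are take/drop at mid = len // 2
def pvAgg (xs : List String) : List (String × Int) :=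
  if xs.length ≤ 1 then
    match xs with
    | [] => []
    | x :: _ => [(x, 1)]
  else
    let mid := xs.length / 2
    pvMerge (pvAgg (xs.take mid)) (pvAgg (xs.drop mid))
termination_by xs.length
decreasing_by
  · simp only [List.length_take]; omega
  · simp only [List.length_drop]; omega

def recipe_to_goal_name_alt (ingredients : List String) : String :=
  let parts := (pvAgg ingredients).map
    (fun p => if p.2 > 1 then PySem.Int.toStr p.2 ++ "_" ++ p.1 else p.1)
  PySem.Str.join "_" parts ++ "_soup"

-- ===== PRECONDITION & SPEC =====
def Spec_recipe_to_goal_name (ingredients : List String) (out : String) : Prop := out = recipe_to_goal_name_alt ingredients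
instance (ingredients : List String) (out : String) : Decidable (Spec_recipe_to_goal_name ingredients out) := by unfold Spec_recipe_to_goal_name; infer_instance

-- ===== CLAIM (what is proved, stated in full; the proofs are below) =====
def Claim_equal_recipe_to_goal_name : Prop := ∀ (ingredients : List String), Dom_recipe_to_goal_name ingredients → Spec_recipe_to_goal_name ingredients (recipe_to_goal_name ingredients)

-- ===== LEMMAS AND PROOFS =====

-- total multiplicity an association list assigns to key x
def pvCnt (l : List (String × Int)) (x : String) : Int :=
  (l.map (fun p => if p.1 = x then p.2 else 0)).sum

lemma pvCnt_cons (p : String × Int) (t : List (String × Int)) (x : String) :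
    pvCnt (p :: t) x = (if p.1 = x then p.2 else 0) + pvCnt t x := by
  simp [pvCnt]

-- unfolding equations of pvAgg (the three arms of _agg)
lemma pvAgg_nil : pvAgg [] = [] := by rw [pvAgg.eq_def]; simp

lemma pvAgg_single (x : String) : pvAgg [x] = [(x, 1)] := by rw [pvAgg.eq_def]; simp

lemma pvAgg_rec (xs : List String) (h : ¬ xs.length ≤ 1) :
    pvAgg xs = pvMerge (pvAgg (xs.take (xs.length / 2))) (pvAgg (xs.drop (xs.length / 2))) := by
  rw [pvAgg.eq_def, if_neg h]

-- merge of two strictly-key-sorted association lists: keys stay strictly sorted,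
-- keys are the union, and multiplicities add
lemma pvMerge_spec (u v : List (String × Int))
    (hu : (u.map Prod.fst).Pairwise (· < ·)) (hv : (v.map Prod.fst).Pairwise (· < ·)) :
    ((pvMerge u v).map Prod.fst).Pairwise (· < ·) ∧
    (∀ x, x ∈ (pvMerge u v).map Prod.fst ↔ x ∈ u.map Prod.fst ∨ x ∈ v.map Prod.fst) ∧
    (∀ x, pvCnt (pvMerge u v) x = pvCnt u x + pvCnt v x) := by
  induction u, v using pvMerge.induct with
  | case1 v =>
    simp only [pvMerge]
    refine ⟨hv, ?_, ?_⟩ <;> intro x <;> simp [pvCnt]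
  | case2 u hne =>
    cases u with
    | nil => exact absurd rfl hne
    | cons p t =>
      simp only [pvMerge]
      refine ⟨hu, ?_, ?_⟩ <;> intro x <;> simp [pvCnt]
  | case3 a c ut b d vt hab ih =>
    have hu' := hu
    have hv' := hv
    simp only [List.map_cons, List.pairwise_cons] at hu' hv'
    obtain ⟨ha_lt, hut⟩ := hu'
    obtain ⟨hb_lt, hvt⟩ := hv'
    obtain ⟨ih1, ih2, ih3⟩ := ih hut hv
    rw [pvMerge, if_pos hab]
    refine ⟨?_, ?_, ?_⟩
    · simp only [List.map_cons, List.pairwise_cons]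
      refine ⟨?_, ih1⟩
      intro y hy
      rcases (ih2 y).mp hy with h | h
      · exact ha_lt y h
      · simp only [List.map_cons, List.mem_cons] at h
        rcases h with rfl | hyt
        · exact hab
        · exact lt_trans hab (hb_lt y hyt)
    · intro x
      have := ih2 x
      simp only [List.map_cons, List.mem_cons] at *
      tauto
    · intro x
      simp only [pvCnt_cons, ih3 x]
      ring
  | case4 a c ut b d vt hab hba ih =>
    have hu' := hu
    have hv' := hv
    simp only [List.map_cons, List.pairwise_cons] at hu' hv'
    obtain ⟨ha_lt, hut⟩ := hu'
    obtain ⟨hb_lt, hvt⟩ := hv'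
    obtain ⟨ih1, ih2, ih3⟩ := ih hu hvt
    rw [pvMerge, if_neg hab, if_pos hba]
    refine ⟨?_, ?_, ?_⟩
    · simp only [List.map_cons, List.pairwise_cons]
      refine ⟨?_, ih1⟩
      intro y hy
      rcases (ih2 y).mp hy with h | h
      · simp only [List.map_cons, List.mem_cons] at h
        rcases h with rfl | hyt
        · exact hba
        · exact lt_trans hba (ha_lt y hyt)
      · exact hb_lt y h
    · intro x
      have := ih2 x
      simp only [List.map_cons, List.mem_cons] at *
      tauto
    · intro x
      simp only [pvCnt_cons, ih3 x]
      ring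
  | case5 a c ut b d vt hab hba ih =>
    have hba' : b = a := le_antisymm (not_lt.mp hab) (not_lt.mp hba)
    subst hba'
    have hu' := hu
    have hv' := hv
    simp only [List.map_cons, List.pairwise_cons] at hu' hv'
    obtain ⟨ha_lt, hut⟩ := hu'
    obtain ⟨hb_lt, hvt⟩ := hv'
    obtain ⟨ih1, ih2, ih3⟩ := ih hut hvt
    rw [pvMerge, if_neg hab, if_neg hba]
    refine ⟨?_, ?_, ?_⟩
    · simp only [List.map_cons, List.pairwise_cons]
      refine ⟨?_, ih1⟩
      intro y hy
      rcases (ih2 y).mp hy with h | h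
      · exact ha_lt y h
      · exact hb_lt y h
    · intro x
      have := ih2 x
      simp only [List.map_cons, List.mem_cons] at *
      tauto
    · intro x
      simp only [pvCnt_cons, ih3 x]
      by_cases hx : b = x <;> simp [hx] <;> ring

-- the aggregation: strictly sorted keys = the distinct elements, counts = multiplicities
lemma pvAgg_spec (xs : List String) :
    ((pvAgg xs).map Prod.fst).Pairwise (· < ·) ∧
    (∀ x, x ∈ (pvAgg xs).map Prod.fst ↔ x ∈ xs) ∧
    (∀ x, pvCnt (pvAgg xs) x = (xs.count x : Int)) := by
  induction xs using pvAgg.induct with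
  | case1 h => simp [pvAgg_nil, pvCnt]
  | case2 x tail hle =>
    have htail : tail = [] := by
      cases tail with
      | nil => rfl
      | cons y t => simp at hle
    subst htail
    refine ⟨by simp [pvAgg_single], by simp [pvAgg_single], ?_⟩
    intro y
    by_cases hxy : x = y <;>
      simp [pvAgg_single, pvCnt, hxy, eq_comm]
  | case3 xs hgt mid ih1 ih2 =>
    obtain ⟨hs1, hm1, hc1⟩ := ih1
    obtain ⟨hs2, hm2, hc2⟩ := ih2
    rw [pvAgg_rec xs hgt]
    obtain ⟨hms, hmm, hmc⟩ := pvMerge_spec _ _ hs1 hs2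
    refine ⟨hms, ?_, ?_⟩
    · intro x
      rw [hmm x, hm1 x, hm2 x, ← List.mem_append, List.take_append_drop]
    · intro x
      rw [hmc x, hc1 x, hc2 x]
      have hcnt : List.count x (List.take mid xs) + List.count x (List.drop mid xs)
          = List.count x xs := by
        rw [← List.count_append, List.take_append_drop]
      rw [← hcnt]
      push_cast
      ring

-- two strictly increasing lists with the same members are equal
lemma pv_sorted_unique (l1 : List String) (h1 : l1.Pairwise (· < ·)) :
    ∀ l2 : List String, l2.Pairwise (· < ·) → (∀ x, x ∈ l1 ↔ x ∈ l2) → l1 = l2 := by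
  induction l1 with
  | nil =>
    intro l2 h2 hm
    cases l2 with
    | nil => rfl
    | cons b t => exact absurd ((hm b).mpr List.mem_cons_self) (List.not_mem_nil)
  | cons a t ih =>
    intro l2 h2 hm
    cases l2 with
    | nil => exact absurd ((hm a).mp List.mem_cons_self) (List.not_mem_nil)
    | cons b t2 =>
      obtain ⟨ha_lt, ht⟩ := List.pairwise_cons.mp h1
      obtain ⟨hb_lt, ht2⟩ := List.pairwise_cons.mp h2
      have hab : a = b := by
        have hal2 : a ∈ b :: t2 := (hm a).mp List.mem_cons_self
        have hbl1 : b ∈ a :: t := (hm b).mpr List.mem_cons_self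
        rcases List.mem_cons.mp hal2 with h | h
        · exact h
        · rcases List.mem_cons.mp hbl1 with h' | h'
          · exact h'.symm
          · exact absurd (lt_trans (hb_lt a h) (ha_lt b h')) (lt_irrefl b)
      subst hab
      have hmt : ∀ x, x ∈ t ↔ x ∈ t2 := by
        intro x
        constructor
        · intro hx
          have hne : x ≠ a := ne_of_gt (ha_lt x hx)
          rcases List.mem_cons.mp ((hm x).mp (List.mem_cons_of_mem _ hx)) with h | h
          · exact absurd h hne
          · exact h
        · intro hx
          have hne : x ≠ a := ne_of_gt (hb_lt x hx)
          rcases List.mem_cons.mp ((hm x).mpr (List.mem_cons_of_mem _ hx)) with h | h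
          · exact absurd h hne
          · exact h
      rw [ih ht t2 ht2 hmt]

-- with strictly sorted (hence distinct) keys, an entry's count is its pvCnt
lemma pvCnt_entry (l : List (String × Int)) (hs : (l.map Prod.fst).Pairwise (· < ·)) :
    ∀ p ∈ l, pvCnt l p.1 = p.2 := by
  induction l with
  | nil => intro p hp; simp at hp
  | cons q t ih =>
    simp only [List.map_cons, List.pairwise_cons] at hs
    obtain ⟨hq_lt, ht⟩ := hs
    intro p hp
    rcases List.mem_cons.mp hp with rfl | hpt
    · rw [pvCnt_cons, if_pos rfl]
      have hz : pvCnt t p.1 = 0 := by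
        unfold pvCnt
        rw [List.sum_eq_zero]
        intro y hy
        obtain ⟨r, hr, hry⟩ := List.mem_map.mp hy
        have : r.1 ≠ p.1 := ne_of_gt (hq_lt r.1 (List.mem_map.mpr ⟨r, hr, rfl⟩))
        rw [← hry, if_neg this]
      rw [hz]; ring
    · rw [pvCnt_cons]
      have : q.1 ≠ p.1 := ne_of_lt (hq_lt p.1 (List.mem_map.mpr ⟨p, hpt, rfl⟩))
      rw [if_neg this, ih ht p hpt]
      ring

-- the part emitted for an element x of multiplicity c
def pvFmt (c : Nat) (x : String) : String :=
  if ((c : Int)) > 1 then PySem.Int.toStr (c : Int) ++ "_" ++ x else x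

-- ===== VERDICT (by name: the statement is the Claim_ definition above) =====
theorem recipe_to_goal_name_spec : Claim_equal_recipe_to_goal_name := by
  intro ingredients _hdom
  show recipe_to_goal_name ingredients = recipe_to_goal_name_alt ingredients
  unfold recipe_to_goal_name recipe_to_goal_name_alt
  simp only [PySem.Dict.keys_counter, PySem.Dict.getD_counter]
  have hbody : (fun (parts : List String) (ing : String) =>
      if ((ingredients.count ing : Int)) > 1 then
        parts ++ [PySem.Int.toStr ((ingredients.count ing : Int)) ++ "_" ++ ing]
      else parts ++ [ing]) =
      (fun parts ing => parts ++ [pvFmt (ingredients.count ing) ing]) := by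
    funext parts ing
    by_cases hc : ((ingredients.count ing : Int)) > 1 <;> simp [pvFmt, hc]
  rw [hbody, PySem.List.foldl_append_singleton_eq_map]
  obtain ⟨hs, hm, hc⟩ := pvAgg_spec ingredients
  -- A's key list is exactly B's merged key list
  have hkeys : PySem.List.sorted (PySem.Set.ofList ingredients) (fun x => x)
      = (pvAgg ingredients).map Prod.fst := by
    apply pv_sorted_unique _ (PySem.List.sorted_ofList_pairwise_lt ingredients) _ hs
    intro x
    rw [hm x]
    simp [PySem.List.mem_sorted, PySem.Set.mem_ofList]
  rw [hkeys]
  -- each entry of pvAgg carries the multiset count of its key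
  have hentry : ∀ p ∈ pvAgg ingredients, p.2 = (ingredients.count p.1 : Int) := by
    intro p hp
    rw [← pvCnt_entry (pvAgg ingredients) hs p hp, hc p.1]
  rw [List.map_map]
  have hmap : (pvAgg ingredients).map ((fun x => pvFmt (ingredients.count x) x) ∘ Prod.fst)
      = (pvAgg ingredients).map
        (fun p => if p.2 > 1 then PySem.Int.toStr p.2 ++ "_" ++ p.1 else p.1) := by
    apply List.map_congr_left
    intro p hp
    simp only [Function.comp, pvFmt, hentry p hp]
  rw [hmap]
  simp
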